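-- pv_equiv track=rewrite | github.com/BLOB-browser/OATFLAKE | scripts/analysis/web_fetcher.py | is_server_error
-- ===== SOURCE A (Python) =====
-- def is_server_error(error_message: str) -> bool:
--     """Check if an error message indicates a server error that should trigger fallbacks
--
--     Args:
--         error_message: The error message returned from fetch_page
--
--     Returns:
--         True if this is a server error that should trigger fallback discovery
--     """
--     server_error_indicators = [
--         "HTTP 500 Server Error",
--         "HTTP 502 Server Error",
--         "HTTP 503 Server Error",
--         "HTTP 504 Server Error"
--     ]
--
--     return any(indicator in error_message for indicator in server_error_indicators)
-- ===== SOURCE B (Python) =====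
-- def is_server_error(error_message: str) -> bool:
--     """Single left-to-right window scan instead of four separate substring searches."""
--     s = error_message
--     n = len(s)
--     for i in range(n):
--         if (s.startswith("HTTP 50", i)
--                 and i + 7 < n
--                 and s[i + 7] in "0234"
--                 and s.startswith(" Server Error", i + 8)):
--             return True
--     return False
-- ===== Notes on version B (the rewrite author's own statement) =====
-- stated objective: alternative
-- what changed: Four independent substring searches ('indicator in message' for each of the 500/502/503/504 strings) are replaced by one left-to-right scan that checks a single 21-character window ('HTTP 50' + a digit from {0,2,3,4} + ' Server Error') at each position.
import Mathlib
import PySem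

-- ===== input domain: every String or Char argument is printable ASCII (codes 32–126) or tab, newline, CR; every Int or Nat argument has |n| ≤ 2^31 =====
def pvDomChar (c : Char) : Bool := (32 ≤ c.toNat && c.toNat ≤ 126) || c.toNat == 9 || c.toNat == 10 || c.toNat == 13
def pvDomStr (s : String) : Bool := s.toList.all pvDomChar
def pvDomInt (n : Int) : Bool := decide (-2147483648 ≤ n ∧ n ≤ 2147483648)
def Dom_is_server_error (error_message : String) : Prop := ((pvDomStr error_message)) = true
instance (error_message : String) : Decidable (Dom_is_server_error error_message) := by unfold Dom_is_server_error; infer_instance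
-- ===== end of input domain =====

-- B replaces A's four separate substring searches by one left-to-right scan that checks a
-- single "HTTP 50[0234] Server Error" window at each position (objective: alternative algorithm, same result).
-- ===== PORT A =====
def is_server_error (error_message : String) : Bool :=
  ["HTTP 500 Server Error", "HTTP 502 Server Error",
   "HTTP 503 Server Error", "HTTP 504 Server Error"].any
    (fun indicator => PySem.Str.isIn indicator error_message)

-- ===== PORT B =====
-- one window check at a given position (B's startswith/index/startswith test)
def pvMatchAt (cs : List Char) : Bool :=
  PySem.Chars.startswith cs ("HTTP 50".toList) &&
    (match cs.drop 7 with
     | [] => false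
     | d :: rest =>
         (d == '0' || d == '2' || d == '3' || d == '4') &&
         PySem.Chars.startswith rest (" Server Error".toList))

-- B's loop over the positions of the string (each position = a suffix)
def pvScan : List Char → Bool
  | [] => false
  | c :: rest => pvMatchAt (c :: rest) || pvScan rest

def is_server_error_alt (error_message : String) : Bool :=
  pvScan error_message.toList

-- ===== PRECONDITION & SPEC =====
def Spec_is_server_error (error_message : String) (out : Bool) : Prop := out = is_server_error_alt error_message
instance (error_message : String) (out : Bool) : Decidable (Spec_is_server_error error_message out) := by unfold Spec_is_server_error; infer_instance

-- ===== CLAIM (what is proved, stated in full; the proofs are below) =====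
def Claim_equal_is_server_error : Prop := ∀ (error_message : String), Dom_is_server_error error_message → Spec_is_server_error error_message (is_server_error error_message)

-- ===== LEMMAS AND PROOFS =====

-- the four indicator strings, as char lists, factored as B's window sees them
theorem pv_factor (d : Char) :
    ("HTTP 50".toList ++ d :: " Server Error".toList)
      = 'H' :: 'T' :: 'T' :: 'P' :: ' ' :: '5' :: '0' :: d :: " Server Error".toList := rfl

theorem pvMatchAt_of (d : Char)
    (hd : (d == '0' || d == '2' || d == '3' || d == '4') = true) (v : List Char) :
    pvMatchAt (("HTTP 50".toList ++ d :: " Server Error".toList) ++ v) = true := by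
  have h1 : PySem.Chars.startswith (("HTTP 50".toList ++ d :: " Server Error".toList) ++ v)
      ("HTTP 50".toList) = true := by
    rw [PySem.Chars.startswith_iff, List.append_assoc]
    exact List.prefix_append _ _
  have h2 : (("HTTP 50".toList ++ d :: " Server Error".toList) ++ v).drop 7
      = d :: (" Server Error".toList ++ v) := by
    rw [pv_factor]; rfl
  have h3 : PySem.Chars.startswith (" Server Error".toList ++ v) (" Server Error".toList) = true := by
    rw [PySem.Chars.startswith_iff]
    exact List.prefix_append _ _
  unfold pvMatchAt
  rw [h2]
  simp only [Bool.and_eq_true]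
  exact ⟨h1, hd, h3⟩

theorem pvMatchAt_elim (t : List Char) (h : pvMatchAt t = true) :
    ∃ d v, (d == '0' || d == '2' || d == '3' || d == '4') = true ∧
      t = ("HTTP 50".toList ++ d :: " Server Error".toList) ++ v := by
  unfold pvMatchAt at h
  rw [Bool.and_eq_true] at h
  obtain ⟨h1, h2⟩ := h
  obtain ⟨u, rfl⟩ := (PySem.Chars.startswith_iff _ _).mp h1
  have hdrop : (("HTTP 50".toList ++ u).drop 7) = u := rfl
  rw [hdrop] at h2
  match u, h2 with
  | d :: rest, h2 =>
    rw [Bool.and_eq_true] at h2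
    obtain ⟨hd, h3⟩ := h2
    obtain ⟨v, rfl⟩ := (PySem.Chars.startswith_iff _ _).mp h3
    exact ⟨d, v, hd, by simp⟩

theorem pvScan_iff (cs : List Char) :
    pvScan cs = true ↔ ∃ t, t <:+ cs ∧ pvMatchAt t = true := by
  induction cs with
  | nil =>
    simp [pvScan]
    decide
  | cons c rest ih =>
    simp [pvScan, ih, List.suffix_cons_iff]

-- ===== VERDICT (by name: the statement is the Claim_ definition above) =====
theorem is_server_error_spec : Claim_equal_is_server_error := by
  intro s _
  unfold Spec_is_server_error
  rw [Bool.eq_iff_iff]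
  unfold is_server_error is_server_error_alt
  simp only [List.any_cons, List.any_nil, Bool.or_eq_true, Bool.or_false,
    PySem.Str.isIn_iff_infix, pvScan_iff, List.infix_iff_prefix_suffix]
  constructor
  · rintro (⟨t, hp, hs⟩ | ⟨t, hp, hs⟩ | ⟨t, hp, hs⟩ | ⟨t, hp, hs⟩) <;>
      obtain ⟨v, rfl⟩ := hp
    · exact ⟨_, hs, pvMatchAt_of '0' (by decide) v⟩
    · exact ⟨_, hs, pvMatchAt_of '2' (by decide) v⟩
    · exact ⟨_, hs, pvMatchAt_of '3' (by decide) v⟩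
    · exact ⟨_, hs, pvMatchAt_of '4' (by decide) v⟩
  · rintro ⟨t, ht, hm⟩
    obtain ⟨d, v, hd, rfl⟩ := pvMatchAt_elim t hm
    simp only [Bool.or_eq_true, beq_iff_eq] at hd
    rcases hd with ((rfl | rfl) | rfl) | rfl
    · exact Or.inl ⟨_, List.prefix_append _ _, ht⟩
    · exact Or.inr (Or.inl ⟨_, List.prefix_append _ _, ht⟩)
    · exact Or.inr (Or.inr (Or.inl ⟨_, List.prefix_append _ _, ht⟩))
    · exact Or.inr (Or.inr (Or.inr ⟨_, List.prefix_append _ _, ht⟩))
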